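-- pv_equiv track=rewrite | github.com/INSPIRE-5Gplus/i5p-wp4-tbns | vl_computation/vl_computation.py | available_spectrum
-- ===== SOURCE A (Python) =====
-- def available_spectrum(a,b):
--   d = []
--   i=a[0]
--   j=a[1]
--
--   for idx, b_item in enumerate(b):
--     start=b_item[0]
--     end=b_item[1]
--     if i == b_item[0]:
--       i=end
--     else:
--       d.append([i,start])
--       i=end
--
--     if idx == len(b)-1 and b_item[1] < a[1]:
--       d.append([end,j])
--
--   return d
-- ===== SOURCE B (Python) =====
-- def available_spectrum(a, b):
--     # Flatten all boundary points into one flat list, append the upper limit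
--     # when the last occupied slot leaves room, then consume the flat list two
--     # points at a time, keeping each unequal pair as a gap.
--     pts = [a[0]]
--     for item in b:
--         pts += [item[0], item[1]]
--     if b and pts[-1] < a[1]:
--         pts.append(a[1])
--     out = []
--     while len(pts) >= 2:
--         x, y = pts[0], pts[1]
--         if x != y:
--             out.append([x, y])
--         pts = pts[2:]
--     return out
-- ===== Notes on version B (the rewrite author's own statement) =====
-- stated objective: alternative
-- what changed: Instead of scanning intervals with a running cursor and an in-loop last-index special case, B flattens all interval boundaries into one flat point list (seeded with a[0], with a[1] appended as one more boundary when the last end leaves room) and then consumes that flat list two points at a time, keeping each unequal pair as a gap.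
import Mathlib
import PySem

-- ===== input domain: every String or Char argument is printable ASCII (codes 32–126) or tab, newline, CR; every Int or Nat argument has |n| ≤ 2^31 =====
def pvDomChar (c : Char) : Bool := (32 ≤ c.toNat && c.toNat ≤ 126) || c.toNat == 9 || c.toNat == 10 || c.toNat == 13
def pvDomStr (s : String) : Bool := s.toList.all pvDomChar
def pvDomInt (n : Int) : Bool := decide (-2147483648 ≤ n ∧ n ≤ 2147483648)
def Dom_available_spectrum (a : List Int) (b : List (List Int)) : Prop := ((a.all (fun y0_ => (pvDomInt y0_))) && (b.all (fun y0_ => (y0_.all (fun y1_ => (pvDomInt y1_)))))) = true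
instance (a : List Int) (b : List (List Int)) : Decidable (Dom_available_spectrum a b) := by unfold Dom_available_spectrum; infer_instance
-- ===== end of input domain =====

-- B replaces A's per-interval cursor loop by a flat boundary-point list consumed two
-- points at a time, with the upper limit appended as one more boundary point
-- (objective: alternative decomposition; same behaviour and cost).

-- ===== PORT A =====
-- A's for-loop over enumerate(b), as the obvious structural recursion over the
-- remaining items, carrying the loop index idx, the running cursor i and accumulator d.
-- Indexing a[0], a[1], b_item[0], b_item[1] is via pyGetD; Pre_ excludes the inputs
-- where Python would raise IndexError.
def availLoop (j : Int) (lenb : Nat) : Nat → List (List Int) → Int → List (List Int) → List (List Int)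
  | _, [], _, d => d
  | idx, b_item :: rest, i, d =>
    let start := PySem.List.pyGetD b_item 0 0
    let e := PySem.List.pyGetD b_item 1 0
    let d1 := if i = start then d else d ++ [[i, start]]
    let d2 := if idx = lenb - 1 ∧ e < j then d1 ++ [[e, j]] else d1
    availLoop j lenb (idx + 1) rest e d2

def available_spectrum (a : List Int) (b : List (List Int)) : List (List Int) :=
  availLoop (PySem.List.pyGetD a 1 0) b.length 0 b (PySem.List.pyGetD a 0 0) []

-- ===== PORT B =====
-- The while loop 'consume two points at a time' of Source B, with its out accumulator;
-- pts[2:] on a list of length ≥ 2 is the tail of the tail.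
def consumePairs : List Int → List (List Int) → List (List Int)
  | x :: y :: rest, out => consumePairs rest (if x ≠ y then out ++ [[x, y]] else out)
  | _, out => out

-- 'pts' after the flattening loop, and 'pts' after the conditional append of a[1].
def altPts (a : List Int) (b : List (List Int)) : List Int :=
  b.foldl (fun acc item => acc ++ [PySem.List.pyGetD item 0 0, PySem.List.pyGetD item 1 0])
    [PySem.List.pyGetD a 0 0]

def altPts2 (a : List Int) (b : List (List Int)) : List Int :=
  if b ≠ [] ∧ PySem.List.pyGetD (altPts a b) (-1) 0 < PySem.List.pyGetD a 1 0
  then altPts a b ++ [PySem.List.pyGetD a 1 0] else altPts a b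

def available_spectrum_alt (a : List Int) (b : List (List Int)) : List (List Int) :=
  consumePairs (altPts2 a b) []

-- ===== PRECONDITION & SPEC =====
-- Pre_ excludes exactly the inputs on which Python A raises IndexError:
-- a needs indices 0 and 1, and each element of b needs indices 0 and 1.
def Pre_available_spectrum (a : List Int) (b : List (List Int)) : Prop :=
  2 ≤ a.length ∧ ∀ x ∈ b, 2 ≤ x.length
instance (a : List Int) (b : List (List Int)) : Decidable (Pre_available_spectrum a b) := by unfold Pre_available_spectrum; infer_instance
def pvWitness_available_spectrum : List Int × List (List Int) := ([0, 10], [[1, 3], [3, 5]])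

def Spec_available_spectrum (a : List Int) (b : List (List Int)) (out : List (List Int)) : Prop := out = available_spectrum_alt a b
instance (a : List Int) (b : List (List Int)) (out : List (List Int)) : Decidable (Spec_available_spectrum a b out) := by unfold Spec_available_spectrum; infer_instance

-- ===== CLAIM (what is proved, stated in full; the proofs are below) =====
def Claim_equal_available_spectrum : Prop := ∀ (a : List Int) (b : List (List Int)), Dom_available_spectrum a b → Pre_available_spectrum a b → Spec_available_spectrum a b (available_spectrum a b)

-- ===== LEMMAS AND PROOFS =====

-- The gap list both programs compute, in its natural recursive form.
def gapsOf : Int → List (List Int) → List (List Int)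
  | _, [] => []
  | i, x :: rest =>
    (if i = PySem.List.pyGetD x 0 0 then [] else [[i, PySem.List.pyGetD x 0 0]]) ++
      gapsOf (PySem.List.pyGetD x 1 0) rest

-- A's trailing-gap append, expressed via the last element of bs.
def tailGap (j : Int) (bs : List (List Int)) : List (List Int) :=
  match bs.getLast? with
  | none => []
  | some last =>
    if PySem.List.pyGetD last 1 0 < j then [[PySem.List.pyGetD last 1 0, j]] else []

theorem availLoop_cons (j : Int) (lenb idx : Nat) (x : List Int) (rest : List (List Int))
    (i : Int) (d : List (List Int)) :
    availLoop j lenb idx (x :: rest) i d =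
      availLoop j lenb (idx + 1) rest (PySem.List.pyGetD x 1 0)
        (if idx = lenb - 1 ∧ PySem.List.pyGetD x 1 0 < j then
          (if i = PySem.List.pyGetD x 0 0 then d else d ++ [[i, PySem.List.pyGetD x 0 0]]) ++
            [[PySem.List.pyGetD x 1 0, j]]
        else (if i = PySem.List.pyGetD x 0 0 then d else d ++ [[i, PySem.List.pyGetD x 0 0]])) := rfl

theorem availLoop_eq (j : Int) (lenb : Nat) (bs : List (List Int)) :
    ∀ (idx : Nat) (i : Int) (d : List (List Int)), idx + bs.length = lenb →
      availLoop j lenb idx bs i d = d ++ gapsOf i bs ++ tailGap j bs := by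
  induction bs with
  | nil => intro idx i d _; simp [availLoop, gapsOf, tailGap]
  | cons x rest ih =>
    intro idx i d hlen
    simp only [List.length_cons] at hlen
    cases rest with
    | nil =>
      have hidx : idx = lenb - 1 := by simp at hlen; omega
      rw [availLoop_cons]
      simp only [availLoop, tailGap, List.getLast?_singleton, gapsOf]
      subst hidx
      by_cases h1 : i = PySem.List.pyGetD x 0 0 <;>
        by_cases h2 : PySem.List.pyGetD x 1 0 < j <;>
          simp [h1, h2, List.append_assoc]
    | cons y rest' =>
      have hidx : ¬ (idx = lenb - 1) := by
        simp only [List.length_cons] at hlen; omega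
      rw [availLoop_cons, ih (idx + 1) (PySem.List.pyGetD x 1 0) _ (by omega)]
      simp only [hidx, false_and, if_false, gapsOf]
      have ht : tailGap j (x :: y :: rest') = tailGap j (y :: rest') := by
        simp [tailGap, List.getLast?_cons_cons]
      rw [ht]
      by_cases h1 : i = PySem.List.pyGetD x 0 0 <;> simp [h1, List.append_assoc]

-- Boundary flattening of one interval.
def bnd (item : List Int) : List Int := [PySem.List.pyGetD item 0 0, PySem.List.pyGetD item 1 0]

-- Final cursor after the whole flat list of bs is consumed.
def finalCursor : Int → List (List Int) → Int
  | i, [] => i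
  | _, x :: rest => finalCursor (PySem.List.pyGetD x 1 0) rest

theorem finalCursor_last (bs : List (List Int)) (i : Int) (h : bs ≠ []) :
    finalCursor i bs = PySem.List.pyGetD (bs.getLast h) 1 0 := by
  induction bs generalizing i with
  | nil => exact absurd rfl h
  | cons x rest ih =>
    cases rest with
    | nil => simp [finalCursor]
    | cons y r => simpa [finalCursor, List.getLast_cons] using ih (PySem.List.pyGetD x 1 0) (by simp)

theorem getLast?_cons_flat (bs : List (List Int)) (i : Int) :
    (i :: bs.flatMap bnd).getLast? = some (finalCursor i bs) := by
  induction bs generalizing i with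
  | nil => simp [finalCursor]
  | cons x rest ih =>
    have hsh : (i :: (x :: rest).flatMap bnd) =
        i :: PySem.List.pyGetD x 0 0 :: (PySem.List.pyGetD x 1 0 :: rest.flatMap bnd) := by
      simp [bnd]
    rw [hsh, List.getLast?_cons_cons, List.getLast?_cons_cons]
    simpa [finalCursor] using ih (PySem.List.pyGetD x 1 0)

theorem consumePairs_out : ∀ (n : Nat) (l : List Int) (out : List (List Int)),
    l.length ≤ n → consumePairs l out = out ++ consumePairs l [] := by
  intro n
  induction n with
  | zero => intro l out h; match l with | [] => simp [consumePairs]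
  | succ n ih =>
    intro l out h
    match l with
    | [] => simp [consumePairs]
    | [x] => simp [consumePairs]
    | x :: y :: rest =>
      simp only [consumePairs]
      by_cases hxy : x = y
      · rw [if_neg (by simp [hxy]), if_neg (by simp [hxy])]
        exact ih rest out (by simp at h; omega)
      · rw [if_pos hxy, if_pos hxy,
            ih rest (out ++ [[x, y]]) (by simp at h; omega),
            ih rest ([] ++ [[x, y]]) (by simp at h; omega)]
        simp

theorem consumePairs_flat (bs : List (List Int)) :
    ∀ (i : Int) (T : List Int) (out : List (List Int)),
      consumePairs (i :: bs.flatMap bnd ++ T) out =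
        out ++ gapsOf i bs ++ consumePairs (finalCursor i bs :: T) [] := by
  induction bs with
  | nil =>
    intro i T out
    simp only [List.flatMap_nil, gapsOf, finalCursor, List.append_nil]
    exact consumePairs_out (i :: T).length (i :: T) out le_rfl
  | cons x rest ih =>
    intro i T out
    have hsh : (i :: (x :: rest).flatMap bnd ++ T) =
        i :: PySem.List.pyGetD x 0 0 :: (PySem.List.pyGetD x 1 0 :: rest.flatMap bnd ++ T) := by
      simp [bnd]
    rw [hsh]
    simp only [consumePairs]
    rw [ih]
    simp only [gapsOf, finalCursor]
    by_cases h : i = PySem.List.pyGetD x 0 0 <;> simp [h, List.append_assoc]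

theorem alt_eq (a : List Int) (b : List (List Int)) :
    available_spectrum_alt a b =
      gapsOf (PySem.List.pyGetD a 0 0) b ++ tailGap (PySem.List.pyGetD a 1 0) b := by
  unfold available_spectrum_alt altPts2
  set i := PySem.List.pyGetD a 0 0 with hi
  set j := PySem.List.pyGetD a 1 0 with hj
  have hpts : ∀ bs : List (List Int), altPts a bs = i :: bs.flatMap bnd := by
    intro bs
    unfold altPts
    rw [PySem.List.foldl_append_eq_flatMap]
    rfl
  cases hb : b with
  | nil => simp [hpts, consumePairs, tailGap, gapsOf]
  | cons x rest =>
    have hne : (x :: rest : List (List Int)) ≠ [] := by simp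
    rw [hpts]
    have hlastpt : PySem.List.pyGetD (i :: (x :: rest).flatMap bnd) (-1) 0 =
        finalCursor i (x :: rest) := by
      rw [PySem.List.pyGetD_neg_one _ 0 (by simp)]
      have h1 : (i :: (x :: rest).flatMap bnd).getLast? =
          some ((i :: (x :: rest).flatMap bnd).getLast (by simp)) := by
        simp [List.getLast?_eq_some_getLast]
      have h2 := getLast?_cons_flat (x :: rest) i
      rw [h1] at h2
      exact Option.some.inj h2
    rw [hlastpt]
    have hc := finalCursor_last (x :: rest) i hne
    have hlast : (x :: rest).getLast? = some ((x :: rest).getLast hne) := by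
      simp [List.getLast?_eq_some_getLast]
    by_cases h : finalCursor i (x :: rest) < j
    · rw [if_pos ⟨hne, h⟩]
      have hT : consumePairs (i :: ((x :: rest).flatMap bnd ++ [j])) [] =
          gapsOf i (x :: rest) ++ consumePairs [finalCursor i (x :: rest), j] [] := by
        simpa using consumePairs_flat (x :: rest) i [j] []
      rw [List.cons_append, hT]
      have hcj : consumePairs [finalCursor i (x :: rest), j] [] =
          [[finalCursor i (x :: rest), j]] := by
        simp [consumePairs, show finalCursor i (x :: rest) ≠ j by omega]
      rw [hcj]
      simp [tailGap, hlast, ← hc, h]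
    · rw [if_neg (by simp [h])]
      have hT : consumePairs (i :: (x :: rest).flatMap bnd) [] =
          gapsOf i (x :: rest) ++ consumePairs [finalCursor i (x :: rest)] [] := by
        simpa using consumePairs_flat (x :: rest) i [] []
      rw [hT]
      simp [consumePairs, tailGap, hlast, ← hc, h]

-- ===== VERDICT (by name: the statement is the Claim_ definition above) =====
theorem available_spectrum_spec : Claim_equal_available_spectrum := by
  intro a b _ _
  unfold Spec_available_spectrum available_spectrum
  rw [availLoop_eq _ _ _ 0 _ _ (by simp), alt_eq]
  simp
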